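-- pv_equiv track=rewrite | github.com/Devopcasting/OCR-Redaction-Engine | documents/passport/document_coordinates.py | _remove_duplicate_coordinates
-- ===== SOURCE A (Python) =====
-- def _remove_duplicate_coordinates(coordinates: list) -> list:
--     new_data = []
--     for item in coordinates:
--         seen = set()
--         unique_coords = []
--         for coord in item['Coordinates']:
--             coord_tuple = tuple(coord)
--             if coord_tuple not in seen:
--                 unique_coords.append(coord)
--                 seen.add(coord_tuple)
--         item['Coordinates'] = unique_coords
--         new_data.append(item)
--     return new_data
-- ===== SOURCE B (Python) =====
-- def _dedup(coords: list) -> list: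
--     # recursive head-filter dedup: keep the head, drop all its later copies, recurse
--     if not coords:
--         return []
--     head = coords[0]
--     rest = [c for c in coords[1:] if c != head]
--     return [head] + _dedup(rest)
--
--
-- def _remove_duplicate_coordinates(coordinates: list) -> list:
--     new_data = []
--     for item in coordinates:
--         item['Coordinates'] = _dedup(item['Coordinates'])
--         new_data.append(item)
--     return new_data
-- ===== Notes on version B (the rewrite author's own statement) =====
-- stated objective: alternative
-- what changed: The seen-set + unique-list + membership-branch single pass is replaced by a recursive head-filter dedup: keep the first coordinate, filter all its later equal copies out of the tail, recurse on the remainder; no seen set and no membership test is maintained.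
import Mathlib
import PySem

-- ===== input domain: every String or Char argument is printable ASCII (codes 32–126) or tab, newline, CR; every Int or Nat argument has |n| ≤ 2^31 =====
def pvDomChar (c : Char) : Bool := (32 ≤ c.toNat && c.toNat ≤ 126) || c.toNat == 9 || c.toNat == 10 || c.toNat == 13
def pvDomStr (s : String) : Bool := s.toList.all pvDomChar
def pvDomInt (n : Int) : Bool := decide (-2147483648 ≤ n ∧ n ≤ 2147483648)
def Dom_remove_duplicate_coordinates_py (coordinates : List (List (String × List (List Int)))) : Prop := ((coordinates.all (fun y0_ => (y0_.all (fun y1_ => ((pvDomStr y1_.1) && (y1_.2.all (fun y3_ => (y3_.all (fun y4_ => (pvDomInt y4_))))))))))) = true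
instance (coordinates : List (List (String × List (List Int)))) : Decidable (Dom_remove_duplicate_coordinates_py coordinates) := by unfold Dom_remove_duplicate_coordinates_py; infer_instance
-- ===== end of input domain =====

-- B replaces A's seen-set/unique-list/membership-branch pass by a recursive head-filter dedup
-- (keep head, filter its later copies out of the tail, recurse); alternative decomposition, not faster.
-- A (and B) mutate each item dict in place; both perform the same mutation, the theorems are about the return value.

-- ===== PORT A =====
-- inner loop of A: seen = set(); unique_coords = []; for coord in …: if tuple(coord) not in seen: append+add
def pvDedupA (coords : List (List Int)) : List (List Int) :=
  (coords.foldl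
    (fun (st : PySem.Set (List Int) × List (List Int)) coord =>
      if PySem.Set.contains st.1 coord then st
      else (PySem.Set.add st.1 coord, st.2 ++ [coord]))
    (PySem.Set.empty, [])).2

def remove_duplicate_coordinates_py (coordinates : List (List (String × List (List Int)))) : List (List (String × List (List Int))) :=
  coordinates.foldl
    (fun new_data item =>
      let d := PySem.Dict.mk item
      let unique_coords := pvDedupA ((d.get? "Coordinates").getD [])
      new_data ++ [(d.insert "Coordinates" unique_coords).items])
    []

-- ===== PORT B =====
-- _dedup of Source B: keep coords[0], filter its copies out of coords[1:], recurse
def pvDedupB : List (List Int) → List (List Int)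
  | [] => []
  | head :: rest => head :: pvDedupB (rest.filter (fun c => c ≠ head))
termination_by coords => coords.length
decreasing_by
  simp only [List.length_unattach]
  exact Nat.lt_succ_of_le (le_trans (List.length_filter_le _ _) (by simp))

def remove_duplicate_coordinates_py_alt (coordinates : List (List (String × List (List Int)))) : List (List (String × List (List Int))) :=
  coordinates.foldl
    (fun new_data item =>
      let d := PySem.Dict.mk item
      let uniq := pvDedupB ((d.get? "Coordinates").getD [])
      new_data ++ [(d.insert "Coordinates" uniq).items])
    []

-- ===== PRECONDITION & SPEC =====
-- Pre_ excludes items missing the 'Coordinates' key (A raises KeyError there) and association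
-- lists with duplicate keys, which do not represent a Python dict (A's parameter is a dict).
def Pre_remove_duplicate_coordinates_py (coordinates : List (List (String × List (List Int)))) : Prop :=
  ∀ item ∈ coordinates, "Coordinates" ∈ item.map Prod.fst ∧ (item.map Prod.fst).Nodup
instance (coordinates : List (List (String × List (List Int)))) : Decidable (Pre_remove_duplicate_coordinates_py coordinates) := by unfold Pre_remove_duplicate_coordinates_py; infer_instance

def pvWitness_remove_duplicate_coordinates_py : (List (List (String × List (List Int)))) :=
  [[("Coordinates", [[1, 2], [1, 2], [3, 4]])], [("Page", [[0]]), ("Coordinates", [])]]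

def Spec_remove_duplicate_coordinates_py (coordinates : List (List (String × List (List Int)))) (out : List (List (String × List (List Int)))) : Prop := out = remove_duplicate_coordinates_py_alt coordinates
instance (coordinates : List (List (String × List (List Int)))) (out : List (List (String × List (List Int)))) : Decidable (Spec_remove_duplicate_coordinates_py coordinates out) := by unfold Spec_remove_duplicate_coordinates_py; infer_instance

-- ===== CLAIM =====
def Claim_equal_remove_duplicate_coordinates_py : Prop := ∀ (coordinates : List (List (String × List (List Int)))), Dom_remove_duplicate_coordinates_py coordinates → Pre_remove_duplicate_coordinates_py coordinates → Spec_remove_duplicate_coordinates_py coordinates (remove_duplicate_coordinates_py coordinates)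

-- ===== LEMMAS AND PROOFS =====

-- A's inner loop keeps st.2 equal to st.1 (the seen set, as a list, IS the unique list)
theorem pvDedupA_invariant (coords : List (List Int)) (s : PySem.Set (List Int)) :
    coords.foldl
      (fun (st : PySem.Set (List Int) × List (List Int)) coord =>
        if PySem.Set.contains st.1 coord then st
        else (PySem.Set.add st.1 coord, st.2 ++ [coord]))
      (s, s) = (coords.foldl PySem.Set.add s, coords.foldl PySem.Set.add s) := by
  induction coords generalizing s with
  | nil => rfl
  | cons c cs ih =>
    rw [List.foldl_cons, List.foldl_cons]
    by_cases h : c ∈ s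
    · have h1 : (if PySem.Set.contains s c then ((s, s) : PySem.Set (List Int) × List (List Int))
          else (PySem.Set.add s c, s ++ [c])) = (s, s) := by
        simp [PySem.Set.contains, h]
      have h2 : PySem.Set.add s c = s := by
        simp [PySem.Set.add, PySem.Set.contains, h]
      rw [h1, h2, ih]
    · have h1 : (if PySem.Set.contains s c then ((s, s) : PySem.Set (List Int) × List (List Int))
          else (PySem.Set.add s c, s ++ [c])) = (PySem.Set.add s c, s ++ [c]) := by
        simp [PySem.Set.contains, h]
      have h2 : PySem.Set.add s c = s ++ [c] := by
        simp [PySem.Set.add, PySem.Set.contains, h]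
      rw [h1, h2, ih]

theorem pvDedupA_eq_ofList (coords : List (List Int)) :
    pvDedupA coords = PySem.Set.ofList coords := by
  unfold pvDedupA
  rw [show (PySem.Set.empty : PySem.Set (List Int)) = ([] : List (List Int)) from rfl]
  rw [pvDedupA_invariant coords ([] : PySem.Set (List Int))]
  rw [PySem.Set.ofList_eq_foldl]

-- folding add over a list skips every occurrence of an element already in the set
theorem foldl_add_filter (x : List Int) (xs : List (List Int)) (s : PySem.Set (List Int))
    (hx : x ∈ s) :
    xs.foldl PySem.Set.add s = (xs.filter (fun y => y ≠ x)).foldl PySem.Set.add s := by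
  induction xs generalizing s with
  | nil => rfl
  | cons y ys ih =>
    by_cases h : y = x
    · subst h
      have : PySem.Set.add s y = s := by simp [PySem.Set.add, PySem.Set.contains, hx]
      simp [this, ih s hx]
    · have hx' : x ∈ PySem.Set.add s y := by
        simp [PySem.Set.add, PySem.Set.contains]
        split <;> simp [hx]
      simp [h, ih _ hx']

-- folding add over ys not containing a keeps a pushed-front element in front
theorem foldl_add_cons (a : List Int) (ys : List (List Int)) (s : PySem.Set (List Int))
    (ha : a ∉ ys) :
    ys.foldl PySem.Set.add (a :: s) = a :: ys.foldl PySem.Set.add s := by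
  induction ys generalizing s with
  | nil => rfl
  | cons y ys ih =>
    have hy : y ≠ a := fun h => ha (h ▸ List.mem_cons_self)
    have hmem : (y ∈ a :: s) ↔ (y ∈ s) := by simp [hy]
    have : PySem.Set.add (a :: s) y = a :: PySem.Set.add s y := by
      simp [PySem.Set.add, PySem.Set.contains, hmem]
      split <;> simp
    rw [List.foldl_cons, this, ih _ (fun h => ha (List.mem_cons_of_mem _ h)), List.foldl_cons]

theorem pvDedupB_eq_ofList_aux (n : Nat) (coords : List (List Int)) (hn : coords.length ≤ n) :
    pvDedupB coords = PySem.Set.ofList coords := by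
  induction n generalizing coords with
  | zero =>
    have : coords = [] := List.eq_nil_of_length_eq_zero (Nat.le_zero.mp hn)
    subst this; rw [pvDedupB]; rfl
  | succ n ih =>
    match coords with
    | [] => rw [pvDedupB]; rfl
    | head :: rest =>
    have hlen : (rest.filter (fun c => c ≠ head)).length ≤ n :=
      le_trans (List.length_filter_le _ _) (Nat.lt_succ_iff.mp (lt_of_lt_of_le (Nat.lt_succ_of_le le_rfl) (by simpa using hn)))
    rw [pvDedupB, ih _ hlen, PySem.Set.ofList_eq_foldl, PySem.Set.ofList_eq_foldl]
    rw [List.foldl_cons]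
    have h1 : PySem.Set.add ([] : PySem.Set (List Int)) head = [head] := rfl
    rw [h1, foldl_add_filter head rest [head] (List.mem_singleton.mpr rfl)]
    rw [foldl_add_cons head _ ([] : PySem.Set (List Int)) (by simp)]

theorem pvDedupB_eq_ofList (coords : List (List Int)) :
    pvDedupB coords = PySem.Set.ofList coords :=
  pvDedupB_eq_ofList_aux coords.length coords le_rfl

theorem pvDedupA_eq_pvDedupB (coords : List (List Int)) : pvDedupA coords = pvDedupB coords := by
  rw [pvDedupA_eq_ofList, pvDedupB_eq_ofList]

-- ===== VERDICT =====
theorem remove_duplicate_coordinates_py_spec : Claim_equal_remove_duplicate_coordinates_py := by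
  intro coordinates _ _
  show remove_duplicate_coordinates_py coordinates = remove_duplicate_coordinates_py_alt coordinates
  unfold remove_duplicate_coordinates_py remove_duplicate_coordinates_py_alt
  simp only [pvDedupA_eq_pvDedupB]
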